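-- pv_equiv track=rewrite | github.com/gabriel-milan/obi-2020 | phase1/anagrama/main.py | handle_inputs
-- ===== SOURCE A (Python) =====
-- acceptable_characters = [
--   'a', 'b', 'c', 'd', 'e', 'f', 'g', 'h', 'i', 'j', 'k', 'l', 'm', 'n', 'o', 'p', 'q', 'r', 's', 't', 'u', 'v', 'w', 'x', 'y', 'z'
-- ]
--
-- def handle_inputs (P, A):
--   p_dict = {}
--   a_dict = {}
--   for char in P:
--     if char not in acceptable_characters:
--       raise ValueError ("Caracter {} não permitido na palavra P!".format(char))
--     else:
--       if char not in p_dict.keys():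
--         p_dict[char] = 0
--       p_dict[char] += 1
--   for char in A:
--     if ((char not in acceptable_characters) and (char != '*')):
--       raise ValueError ("Caracter {} não permitido na palavra A!".format(char))
--     else:
--       if char not in a_dict.keys():
--         a_dict[char] = 0
--       a_dict[char] += 1
--   return p_dict, a_dict
-- ===== SOURCE B (Python) =====
-- def handle_inputs(P, A):
--   # Dedup-then-count: take the distinct characters in first-occurrence order,
--   # validate each once with a range comparison, and build each dict by a
--   # comprehension counting occurrences with str.count (no incremental dict).
--   p_keys = list(dict.fromkeys(P))
--   for char in p_keys:
--     if not ('a' <= char <= 'z'):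
--       raise ValueError("Caracter {} não permitido na palavra P!".format(char))
--   a_keys = list(dict.fromkeys(A))
--   for char in a_keys:
--     if char != '*' and not ('a' <= char <= 'z'):
--       raise ValueError("Caracter {} não permitido na palavra A!".format(char))
--   return {c: P.count(c) for c in p_keys}, {c: A.count(c) for c in a_keys}
-- ===== Notes on version B (the rewrite author's own statement) =====
-- stated objective: alternative
-- what changed: Replaces the interleaved validate-and-increment accumulation with a dedup-then-count decomposition: first-occurrence distinct keys are extracted once, each distinct key is validated once by a range comparison, and each count comes from a separate str.count scan (C-level), with no incrementally updated dict.
import Mathlib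
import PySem

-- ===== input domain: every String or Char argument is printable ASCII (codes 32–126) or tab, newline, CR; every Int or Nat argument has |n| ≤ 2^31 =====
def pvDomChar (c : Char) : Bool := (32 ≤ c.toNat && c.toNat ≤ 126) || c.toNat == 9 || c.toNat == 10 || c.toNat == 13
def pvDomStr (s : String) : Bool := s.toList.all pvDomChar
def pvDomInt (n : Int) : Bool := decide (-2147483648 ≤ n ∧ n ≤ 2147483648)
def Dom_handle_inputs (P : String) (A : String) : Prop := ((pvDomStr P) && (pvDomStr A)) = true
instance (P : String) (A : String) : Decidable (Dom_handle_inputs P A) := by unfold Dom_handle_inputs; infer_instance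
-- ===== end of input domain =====

-- B replaces the interleaved validate-and-increment loops by a dedup-then-count decomposition (alternative; equivalence of the returned pair on inputs where A raises no ValueError).

-- ===== PORT A =====
-- Python dict keys are single characters; under the type convention they become singleton Strings.
def sOf (c : Char) : String := String.ofList [c]

def acceptable_characters : List Char :=
  ['a', 'b', 'c', 'd', 'e', 'f', 'g', 'h', 'i', 'j', 'k', 'l', 'm',
   'n', 'o', 'p', 'q', 'r', 's', 't', 'u', 'v', 'w', 'x', 'y', 'z']

def validP (c : Char) : Bool := decide (c ∈ acceptable_characters)
def validA (c : Char) : Bool := decide (c ∈ acceptable_characters) || decide (c = '*')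

-- A's loop: validate each char, raise (= none) on the first invalid one, else increment its count.
def loopA (valid : Char → Bool) : List Char → PySem.Dict String Int → Option (PySem.Dict String Int)
  | [], d => some d
  | c :: cs, d =>
      if valid c then loopA valid cs (d.insert (sOf c) (d.getD (sOf c) 0 + 1))
      else none

def handle_inputs (P : String) (A : String) : (List (String × Int)) × (List (String × Int)) :=
  match loopA validP P.toList PySem.Dict.empty with
  | none => ([], [])        -- ValueError on P; excluded by Pre_
  | some p =>
    match loopA validA A.toList PySem.Dict.empty with
    | none => ([], [])      -- ValueError on A; excluded by Pre_
    | some a => (p.items, a.items)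

-- ===== PORT B =====
-- B's range comparison 'a' <= char <= 'z' on the single characters:
def okP (c : Char) : Bool := decide ('a' ≤ c) && decide (c ≤ 'z')
def okA (c : Char) : Bool := decide (c = '*') || okP c

-- str.count for a single-character needle is exactly List.count on the characters.
def handle_inputs_alt (P : String) (A : String) : (List (String × Int)) × (List (String × Int)) :=
  let p_keys := PySem.List.dedup P.toList
  if p_keys.all okP then
    let a_keys := PySem.List.dedup A.toList
    if a_keys.all okA then
      (p_keys.map (fun c => (sOf c, (P.toList.count c : Int))),
       a_keys.map (fun c => (sOf c, (A.toList.count c : Int))))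
    else ([], [])           -- ValueError on A; excluded by Pre_
  else ([], [])             -- ValueError on P; excluded by Pre_

-- ===== PRECONDITION & SPEC =====
-- Pre_ excludes exactly the inputs on which A raises ValueError (a char of P outside a–z, or a char of A outside a–z and '*').
def Pre_handle_inputs (P : String) (A : String) : Prop :=
  (P.toList.all validP) = true ∧ (A.toList.all validA) = true
instance (P : String) (A : String) : Decidable (Pre_handle_inputs P A) := by unfold Pre_handle_inputs; infer_instance

def pvWitness_handle_inputs : String × String := ("banana", "an*ana")

def Spec_handle_inputs (P : String) (A : String) (out : (List (String × Int)) × (List (String × Int))) : Prop := out = handle_inputs_alt P A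
instance (P : String) (A : String) (out : (List (String × Int)) × (List (String × Int))) : Decidable (Spec_handle_inputs P A out) := by unfold Spec_handle_inputs; infer_instance

-- ===== CLAIM (what is proved, stated in full; the proofs are below) =====
def Claim_equal_handle_inputs : Prop := ∀ (P : String) (A : String), Dom_handle_inputs P A → Pre_handle_inputs P A → Spec_handle_inputs P A (handle_inputs P A)

-- ===== LEMMAS AND PROOFS =====
theorem loopA_all_valid (valid : Char → Bool) (cs : List Char) (d : PySem.Dict String Int)
    (h : ∀ c ∈ cs, valid c = true) :
    loopA valid cs d = some (cs.foldl (fun d c => d.insert (sOf c) (d.getD (sOf c) 0 + 1)) d) := by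
  induction cs generalizing d with
  | nil => rfl
  | cons c cs ih =>
      simp only [loopA, h c (List.mem_cons_self), if_true, List.foldl_cons]
      exact ih _ (fun x hx => h x (List.mem_cons_of_mem _ hx))

theorem sOf_injective : Function.Injective sOf := by
  intro a b h
  have : (sOf a).toList = (sOf b).toList := by rw [h]
  simpa [sOf] using this

theorem set_ofList_map_sOf (cs : List Char) :
    PySem.Set.ofList (cs.map sOf) = (PySem.Set.ofList cs).map sOf := by
  have key : ∀ (xs : List Char) (acc : List Char),
      (xs.map sOf).foldl PySem.Set.add (acc.map sOf)
        = (xs.foldl PySem.Set.add acc).map sOf := by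
    intro xs
    induction xs with
    | nil => intro acc; rfl
    | cons x xs ih =>
        intro acc
        have hmem : PySem.Set.contains (acc.map sOf) (sOf x) = PySem.Set.contains acc x := by
          simp only [PySem.Set.contains, List.contains_eq_mem, decide_eq_decide]
          exact ⟨fun h => by
              obtain ⟨c, hc, hcc⟩ := List.mem_map.mp h
              exact (sOf_injective hcc) ▸ hc,
            fun h => List.mem_map_of_mem h⟩
        simp only [List.map_cons, List.foldl_cons, PySem.Set.add, hmem]
        by_cases hx : PySem.Set.contains acc x = true
        · simp only [hx, if_true]; exact ih acc
        · simp only [Bool.not_eq_true] at hx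
          simp only [hx, Bool.false_eq_true, if_false]
          have := ih (acc ++ [x])
          simpa using this
  have h0 := key cs []
  simpa [PySem.Set.ofList_eq_foldl] using h0

theorem items_eq_dedup_map (cs : List Char) :
    (PySem.Dict.counter (cs.map sOf)).items
      = (PySem.List.dedup cs).map (fun c => (sOf c, (cs.count c : Int))) := by
  rw [PySem.Dict.items_counter, set_ofList_map_sOf, List.map_map]
  rw [PySem.List.dedup_eq_ofList]
  apply List.map_congr_left
  intro c _
  simp only [Function.comp_apply]
  rw [List.count_map_of_injective _ _ sOf_injective]

theorem foldl_eq_counter (cs : List Char) :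
    cs.foldl (fun d c => d.insert (sOf c) (d.getD (sOf c) 0 + 1)) PySem.Dict.empty
      = PySem.Dict.counter (cs.map sOf) := by
  rw [← PySem.Dict.foldl_insert_getD_add_one_eq_counter, List.foldl_map]

theorem okP_of_validP (c : Char) (h : validP c = true) : okP c = true := by
  simp only [validP, decide_eq_true_eq] at h
  fin_cases h <;> decide

theorem okA_of_validA (c : Char) (h : validA c = true) : okA c = true := by
  simp only [validA, Bool.or_eq_true, decide_eq_true_eq] at h
  rcases h with h | rfl
  · simp only [okA, Bool.or_eq_true]; exact Or.inr (okP_of_validP c (by simp [validP, h]))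
  · decide

theorem dedup_all_ok (cs : List Char) (q : Char → Bool) (h : ∀ c ∈ cs, q c = true) :
    (PySem.List.dedup cs).all q = true := by
  rw [List.all_eq_true, PySem.List.dedup_eq_ofList]
  intro c hc
  exact h c ((PySem.Set.mem_ofList cs c).mp hc)

-- ===== VERDICT (by name: the statement is the Claim_ definition above) =====
theorem handle_inputs_spec : Claim_equal_handle_inputs := by
  intro P A _ hPre
  obtain ⟨hP, hA⟩ := hPre
  rw [List.all_eq_true] at hP hA
  show handle_inputs P A = handle_inputs_alt P A
  unfold handle_inputs handle_inputs_alt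
  rw [loopA_all_valid _ _ _ hP, loopA_all_valid _ _ _ hA]
  rw [foldl_eq_counter, foldl_eq_counter]
  simp only [dedup_all_ok P.toList okP (fun c hc => okP_of_validP c (hP c hc)),
             dedup_all_ok A.toList okA (fun c hc => okA_of_validA c (hA c hc)),
             if_true, items_eq_dedup_map]
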